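-- pv_equiv track=rewrite | github.com/xomicsdatascience/zoDIAq | src/zodiaq/loaders/library/decoyGenerationFunctions.py | insert_cleavage_amino_acids_into_shuffled_peptide
-- ===== SOURCE A (Python) =====
-- def insert_cleavage_amino_acids_into_shuffled_peptide(shuffledPeptide, cleavageAALocations, peptide):
--     for j in range(len(cleavageAALocations) - 1, -1, -1):
--         cleavageAAIndex = cleavageAALocations[j][0]
--         if not cleavageAAIndex:
--             cleavageAAIndex = len(peptide)
--         cleavageAA = cleavageAALocations[j][1]
--         shuffledPeptide.insert(cleavageAAIndex, cleavageAA)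
--     return shuffledPeptide
-- ===== SOURCE B (Python) =====
-- def insert_cleavage_amino_acids_into_shuffled_peptide(shuffledPeptide, cleavageAALocations, peptide):
--     # Work-stack rebuild: pop locations off a stack and splice each amino acid in
--     # with pure slicing (fresh lists), then write the result back in place.
--     result = list(shuffledPeptide)
--     stack = list(cleavageAALocations)
--     while stack:
--         cleavageAAIndex, cleavageAA = stack.pop()
--         i = cleavageAAIndex if cleavageAAIndex else len(peptide)
--         result = result[:i] + [cleavageAA] + result[i:]
--     shuffledPeptide[:] = result
--     return shuffledPeptide
-- ===== Notes on version B (the rewrite author's own statement) =====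
-- stated objective: alternative
-- what changed: Replaces the reverse index loop with destructive list.insert calls by a work-stack loop that splices each amino acid in with pure slicing on fresh lists and writes the result back in place once at the end.
import Mathlib
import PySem

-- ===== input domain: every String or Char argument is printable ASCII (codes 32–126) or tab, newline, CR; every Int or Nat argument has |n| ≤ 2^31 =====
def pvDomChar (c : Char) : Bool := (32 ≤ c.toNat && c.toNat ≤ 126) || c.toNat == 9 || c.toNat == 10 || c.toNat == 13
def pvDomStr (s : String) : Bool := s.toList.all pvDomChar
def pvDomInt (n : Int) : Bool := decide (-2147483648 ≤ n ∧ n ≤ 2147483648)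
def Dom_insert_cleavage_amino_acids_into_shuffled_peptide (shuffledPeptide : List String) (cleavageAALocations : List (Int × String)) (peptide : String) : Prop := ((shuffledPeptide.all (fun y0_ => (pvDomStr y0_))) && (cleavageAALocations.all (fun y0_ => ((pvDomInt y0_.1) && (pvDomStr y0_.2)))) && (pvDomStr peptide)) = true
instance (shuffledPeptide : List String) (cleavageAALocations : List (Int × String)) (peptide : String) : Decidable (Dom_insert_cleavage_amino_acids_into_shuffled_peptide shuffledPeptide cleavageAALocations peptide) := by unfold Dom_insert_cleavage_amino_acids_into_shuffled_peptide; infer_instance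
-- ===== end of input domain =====

-- B rebuilds the list with a work-stack loop and pure slice-splicing instead of A's reverse index
-- loop of in-place list.insert calls (same cost; return values proved equal — both Pythons mutate
-- shuffledPeptide to the same final content, A incrementally, B by one final write-back).

-- ===== PORT A =====
-- for j in range(len(cleavageAALocations)-1, -1, -1): look up locations[j], fix a falsy (0) index
-- to len(peptide), and list.insert into the accumulating list.
def insert_cleavage_amino_acids_into_shuffled_peptide (shuffledPeptide : List String) (cleavageAALocations : List (Int × String)) (peptide : String) : List String :=
  (PySem.List.pyRange ((cleavageAALocations.length : Int) - 1) (-1) (-1)).foldl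
    (fun acc j =>
      match PySem.List.pyGet? cleavageAALocations j with
      | some (cleavageAAIndex, cleavageAA) =>
          let i := if cleavageAAIndex = 0 then PySem.Str.len peptide else cleavageAAIndex
          PySem.List.insert acc i cleavageAA
      | none => acc)  -- dead branch: j always indexes cleavageAALocations
    shuffledPeptide

-- ===== PORT B =====
-- while stack: pop the last location, splice the AA in via result[:i] + [aa] + result[i:]
def pvStackSplice (peptide : String) (stack : List (Int × String)) (result : List String) : List String :=
  match h : stack.getLast? with
  | none => result
  | some (cleavageAAIndex, cleavageAA) =>
      let i := if cleavageAAIndex = 0 then PySem.Str.len peptide else cleavageAAIndex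
      pvStackSplice peptide stack.dropLast
        (PySem.List.slice result none (some i) ++ [cleavageAA] ++ PySem.List.slice result (some i) none)
  termination_by stack.length
  decreasing_by
    have : stack ≠ [] := by intro hnil; rw [hnil] at h; simp at h
    simpa [List.length_dropLast] using Nat.sub_lt (List.length_pos_iff.mpr this) one_pos

def insert_cleavage_amino_acids_into_shuffled_peptide_alt (shuffledPeptide : List String) (cleavageAALocations : List (Int × String)) (peptide : String) : List String :=
  pvStackSplice peptide cleavageAALocations shuffledPeptide

-- ===== PRECONDITION & SPEC =====
def Spec_insert_cleavage_amino_acids_into_shuffled_peptide (shuffledPeptide : List String) (cleavageAALocations : List (Int × String)) (peptide : String) (out : List String) : Prop := out = insert_cleavage_amino_acids_into_shuffled_peptide_alt shuffledPeptide cleavageAALocations peptide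
instance (shuffledPeptide : List String) (cleavageAALocations : List (Int × String)) (peptide : String) (out : List String) : Decidable (Spec_insert_cleavage_amino_acids_into_shuffled_peptide shuffledPeptide cleavageAALocations peptide out) := by unfold Spec_insert_cleavage_amino_acids_into_shuffled_peptide; infer_instance

-- ===== CLAIM (what is proved, stated in full; the proofs are below) =====
def Claim_equal_insert_cleavage_amino_acids_into_shuffled_peptide : Prop := ∀ (shuffledPeptide : List String) (cleavageAALocations : List (Int × String)) (peptide : String), Dom_insert_cleavage_amino_acids_into_shuffled_peptide shuffledPeptide cleavageAALocations peptide → Spec_insert_cleavage_amino_acids_into_shuffled_peptide shuffledPeptide cleavageAALocations peptide (insert_cleavage_amino_acids_into_shuffled_peptide shuffledPeptide cleavageAALocations peptide)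

-- ===== LEMMAS AND PROOFS =====

-- B's slice-splice performs exactly Python list.insert, for every Int index
theorem pv_slice_splice_eq_insert (xs : List String) (i : Int) (v : String) :
    PySem.List.slice xs none (some i) ++ [v] ++ PySem.List.slice xs (some i) none
      = PySem.List.insert xs i v := by
  have hclamp : ((if i < 0 then max (i + (xs.length : Int)) 0 else min i (xs.length : Int)).toNat)
      = PySem.List.clampIdx xs.length i := by
    simp [PySem.List.clampIdx]; split_ifs <;> omega
  simp [PySem.List.slice, PySem.List.insert, PySem.List.sliceIndices, hclamp]

-- the common step both programs perform for one location
def pvStep (peptide : String) (p : Int × String) (acc : List String) : List String :=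
  PySem.List.insert acc (if p.1 = 0 then PySem.Str.len peptide else p.1) p.2

theorem pv_foldr_congr {α β : Type} {l : List α} {f g : α → β → β}
    (h : ∀ k ∈ l, ∀ acc, f k acc = g k acc) (init : β) : l.foldr f init = l.foldr g init := by
  induction l with
  | nil => rfl
  | cons x xs ih =>
      simp only [List.foldr_cons]
      rw [ih (fun k hk acc => h k (List.mem_cons_of_mem x hk) acc),
        h x List.mem_cons_self]

theorem pvStackSplice_eq_foldr (peptide : String) (stack : List (Int × String)) (result : List String) :
    pvStackSplice peptide stack result = stack.foldr (pvStep peptide) result := by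
  induction stack using List.reverseRecOn generalizing result with
  | nil => rw [pvStackSplice]; simp
  | append_singleton s p ih =>
      rw [pvStackSplice]
      split
      · next hnone => simp at hnone
      · next q r hsome =>
          rw [List.getLast?_concat, Option.some.injEq] at hsome
          subst hsome
          simp only [List.dropLast_concat, List.foldr_append, List.foldr_cons, List.foldr_nil]
          rw [ih]
          congr 1
          rw [pv_slice_splice_eq_insert]
          rfl

-- A's countdown fold over indices, rephrased as a foldr over the location list itself
theorem pv_range_foldr (peptide : String) (locs : List (Int × String)) (sp : List String) :
    (List.range locs.length).foldr
      (fun k acc =>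
        match PySem.List.pyGet? locs ((k : Nat) : Int) with
        | some (cleavageAAIndex, cleavageAA) =>
            let i := if cleavageAAIndex = 0 then PySem.Str.len peptide else cleavageAAIndex
            PySem.List.insert acc i cleavageAA
        | none => acc) sp
      = locs.foldr (pvStep peptide) sp := by
  induction locs using List.reverseRecOn generalizing sp with
  | nil => rfl
  | append_singleton s q ih =>
      simp only [List.length_append, List.length_cons, List.length_nil, Nat.zero_add]
      rw [show s.length + 1 = Nat.succ s.length from rfl, List.range_succ,
        List.foldr_append, List.foldr_cons, List.foldr_nil]
      have hq : PySem.List.pyGet? (s ++ [q]) ((s.length : Nat) : Int) = some q := by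
        simp [PySem.List.pyGet?, PySem.List.pyIdx?]
      rw [hq]
      have hcong : ∀ k ∈ List.range s.length, ∀ acc : List String,
          (match PySem.List.pyGet? (s ++ [q]) ((k : Nat) : Int) with
           | some (cleavageAAIndex, cleavageAA) =>
               let i := if cleavageAAIndex = 0 then PySem.Str.len peptide else cleavageAAIndex
               PySem.List.insert acc i cleavageAA
           | none => acc)
          = (match PySem.List.pyGet? s ((k : Nat) : Int) with
             | some (cleavageAAIndex, cleavageAA) =>
                 let i := if cleavageAAIndex = 0 then PySem.Str.len peptide else cleavageAAIndex
                 PySem.List.insert acc i cleavageAA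
             | none => acc) := by
        intro k hk acc
        have hk' : k < s.length := List.mem_range.mp hk
        have hg : PySem.List.pyGet? (s ++ [q]) ((k : Nat) : Int)
            = PySem.List.pyGet? s ((k : Nat) : Int) := by
          simp only [PySem.List.pyGet?, PySem.List.pyIdx?, List.length_append,
            List.length_cons, List.length_nil]
          push_cast
          split_ifs <;> try omega
          simp only [Int.toNat_natCast, Option.bind_some]
          exact List.getElem?_append_left hk'
        rw [hg]
      rw [pv_foldr_congr hcong, ih, List.foldr_append, List.foldr_cons, List.foldr_nil]
      rfl

theorem pv_A_eq_foldr (peptide : String) (locs : List (Int × String)) (sp : List String) :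
    (PySem.List.pyRange ((locs.length : Int) - 1) (-1) (-1)).foldl
      (fun acc j =>
        match PySem.List.pyGet? locs j with
        | some (cleavageAAIndex, cleavageAA) =>
            let i := if cleavageAAIndex = 0 then PySem.Str.len peptide else cleavageAAIndex
            PySem.List.insert acc i cleavageAA
        | none => acc) sp
      = locs.foldr (pvStep peptide) sp := by
  rw [PySem.List.pyRange_neg_one_eq_reverse, List.foldl_reverse]
  have h1 : (-1 : Int) + 1 = 0 := by norm_num
  have h2 : ((locs.length : Int) - 1) + 1 = ((locs.length : Nat) : Int) := by omega
  rw [h1, h2, PySem.List.pyRange_zero_nat, List.foldr_map]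
  exact pv_range_foldr peptide locs sp

-- ===== VERDICT (by name: the statement is the Claim_ definition above) =====
theorem insert_cleavage_amino_acids_into_shuffled_peptide_spec : Claim_equal_insert_cleavage_amino_acids_into_shuffled_peptide := by
  intro sp locs peptide _
  show insert_cleavage_amino_acids_into_shuffled_peptide sp locs peptide
      = insert_cleavage_amino_acids_into_shuffled_peptide_alt sp locs peptide
  rw [insert_cleavage_amino_acids_into_shuffled_peptide,
    insert_cleavage_amino_acids_into_shuffled_peptide_alt,
    pvStackSplice_eq_foldr, pv_A_eq_foldr]
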